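-- pv_equiv track=rewrite | github.com/ericstubley/advent-of-code | 2015/03/puzzle_2015_03b.py | split_track_presents
-- ===== SOURCE A (Python) =====
-- def next_position(curr_pos, direction):
--     x, y = curr_pos
--     if direction == '>':
--         x += 1
--     elif direction == '<':
--         x -= 1
--     elif direction == '^':
--         y += 1
--     elif direction == 'v':
--         y -= 1
--     return (x, y)
--
-- def split_track_presents(path):
--     tracker = {(0, 0): 2}
--
--     real_path, robo_path = path[0::2], path[1::2]
--
--     curr_pos = (0, 0)
--     for direction in real_path:
--         next_pos = next_position(curr_pos, direction)
--         if next_pos in tracker: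
--             tracker[next_pos] += 1
--         else:
--             tracker[next_pos] = 1
--         curr_pos = next_pos
--
--     curr_pos = (0, 0)
--     for direction in robo_path:
--         next_pos = next_position(curr_pos, direction)
--         if next_pos in tracker:
--             tracker[next_pos] += 1
--         else:
--             tracker[next_pos] = 1
--         curr_pos = next_pos
--
--     return tracker
-- ===== SOURCE B (Python) =====
-- def split_track_presents(path):
--     # B: no per-visit hash increments. Materialise the visit sequence with a
--     # delta table, count multiplicities by sorting it and measuring runs of
--     # equal positions, then emit first occurrences with their run totals.
--     deltas = {'>': (1, 0), '<': (-1, 0), '^': (0, 1), 'v': (0, -1)}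
--
--     def walk(moves):
--         x = y = 0
--         pts = []
--         for d in moves:
--             dx, dy = deltas.get(d, (0, 0))
--             x += dx
--             y += dy
--             pts.append((x, y))
--         return pts
--
--     visits = [(0, 0), (0, 0)] + walk(path[0::2]) + walk(path[1::2])
--
--     # sort: equal positions become contiguous runs; run length = multiplicity
--     srt = sorted(visits)
--     counts = {}
--     i = 0
--     n = len(srt)
--     while i < n:
--         j = i + 1
--         while j < n and srt[j] == srt[i]:
--             j += 1
--         counts[srt[i]] = j - i
--         i = j
--
--     # emit in first-occurrence order of the visit sequence
--     tracker = {}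
--     for p in visits:
--         if p not in tracker:
--             tracker[p] = counts[p]
--     return tracker
-- ===== Notes on version B (the rewrite author's own statement) =====
-- stated objective: alternative
-- what changed: A walks each Santa while incrementing a hash-dict counter at every visit; B never increments: it materialises the whole visit sequence via a delta table, counts multiplicities by sorting it and measuring runs of equal positions, and then emits first occurrences paired with their precomputed run totals.
import Mathlib
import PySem

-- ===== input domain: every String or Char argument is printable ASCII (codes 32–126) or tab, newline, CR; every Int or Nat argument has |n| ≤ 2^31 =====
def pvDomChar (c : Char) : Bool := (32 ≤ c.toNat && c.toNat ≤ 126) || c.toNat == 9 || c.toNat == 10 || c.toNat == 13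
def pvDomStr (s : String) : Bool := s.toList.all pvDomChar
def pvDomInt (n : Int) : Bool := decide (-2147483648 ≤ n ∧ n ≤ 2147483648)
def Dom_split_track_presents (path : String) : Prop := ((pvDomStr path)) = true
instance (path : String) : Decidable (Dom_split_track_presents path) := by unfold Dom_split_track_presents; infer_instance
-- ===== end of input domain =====

-- B replaces A's per-visit hash-counter increments by a sort-and-run-length count of the
-- materialised visit sequence (then emits first occurrences with their totals): an
-- alternative algorithm of similar size, not claimed faster.

-- ===== PORT A =====
def pvNextPosition (curr_pos : Int × Int) (direction : Char) : Int × Int :=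
  let x := curr_pos.1
  let y := curr_pos.2
  if direction = '>' then (x + 1, y)
  else if direction = '<' then (x - 1, y)
  else if direction = '^' then (x, y + 1)
  else if direction = 'v' then (x, y - 1)
  else (x, y)

def pvAStep (st : PySem.Dict (Int × Int) Int × (Int × Int)) (direction : Char) :
    PySem.Dict (Int × Int) Int × (Int × Int) :=
  let next_pos := pvNextPosition st.2 direction
  (if st.1.contains next_pos then st.1.insert next_pos (st.1.getD next_pos 0 + 1)
   else st.1.insert next_pos 1,
   next_pos)

def split_track_presents (path : String) : List (Int × Int × Int) :=
  let tracker : PySem.Dict (Int × Int) Int := PySem.Dict.ofList [((0, 0), 2)]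
  let real_path := (PySem.List.slice? path.toList (some 0) none 2).getD []
  let robo_path := (PySem.List.slice? path.toList (some 1) none 2).getD []
  let s1 := real_path.foldl pvAStep (tracker, ((0 : Int), (0 : Int)))
  let s2 := robo_path.foldl pvAStep (s1.1, ((0 : Int), (0 : Int)))
  s2.1.items.map (fun p => (p.1.1, p.1.2, p.2))

-- ===== PORT B =====
def pvDeltas : PySem.Dict Char (Int × Int) :=
  PySem.Dict.ofList [('>', (1, 0)), ('<', (-1, 0)), ('^', (0, 1)), ('v', (0, -1))]

def pvWalk (moves : List Char) : List (Int × Int) :=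
  (moves.foldl
    (fun (st : (Int × Int) × List (Int × Int)) d =>
      let dd := pvDeltas.getD d (0, 0)
      let np := (st.1.1 + dd.1, st.1.2 + dd.2)
      (np, st.2 ++ [np]))
    ((((0 : Int), (0 : Int))), [])).2

-- the two nested 'while' index loops over srt: consume one run of equal elements per step
def pvRunsLoop : List (Int × Int) → PySem.Dict (Int × Int) Int → PySem.Dict (Int × Int) Int
  | [], counts => counts
  | p :: rest, counts =>
      pvRunsLoop (rest.dropWhile (fun q => q == p))
        (counts.insert p (((rest.takeWhile (fun q => q == p)).length : Int) + 1))
termination_by l _ => l.length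
decreasing_by
  simp only [List.length_cons]
  exact Nat.lt_succ_of_le (List.length_dropWhile_le _ _)

def split_track_presents_alt (path : String) : List (Int × Int × Int) :=
  let visits :=
    [(((0 : Int), (0 : Int))), ((0 : Int), (0 : Int))] ++
      pvWalk ((PySem.List.slice? path.toList (some 0) none 2).getD []) ++
      pvWalk ((PySem.List.slice? path.toList (some 1) none 2).getD [])
  let srt := PySem.List.sorted2 visits Prod.fst Prod.snd
  let counts := pvRunsLoop srt PySem.Dict.empty
  -- counts[p]: exact here — every p ∈ visits is a key of counts, so the default is never read
  let tracker := visits.foldl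
    (fun (t : PySem.Dict (Int × Int) Int) p =>
      if t.contains p then t else t.insert p (counts.getD p 0))
    PySem.Dict.empty
  tracker.items.map (fun p => (p.1.1, p.1.2, p.2))

-- ===== PRECONDITION & SPEC =====
def Spec_split_track_presents (path : String) (out : List (Int × Int × Int)) : Prop := out = split_track_presents_alt path
instance (path : String) (out : List (Int × Int × Int)) : Decidable (Spec_split_track_presents path out) := by unfold Spec_split_track_presents; infer_instance

-- ===== CLAIM (what is proved, stated in full; the proofs are below) =====
def Claim_equal_split_track_presents : Prop := ∀ (path : String), Dom_split_track_presents path → Spec_split_track_presents path (split_track_presents path)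

-- ===== LEMMAS AND PROOFS =====

-- the position sequence a walk starting at pos visits, one entry per move
def pvWalkFrom (pos : Int × Int) : List Char → List (Int × Int)
  | [] => []
  | c :: cs => pvNextPosition pos c :: pvWalkFrom (pvNextPosition pos c) cs

-- A's per-move dict update is exactly the counting step
theorem pvAStep_dict (d : PySem.Dict (Int × Int) Int) (p : Int × Int) :
    (if d.contains p then d.insert p (d.getD p 0 + 1) else d.insert p 1) =
      d.insert p (d.getD p 0 + 1) := by
  by_cases h : d.contains p = true
  · simp [h]
  · simp only [Bool.not_eq_true] at h
    simp [h, PySem.Dict.getD_of_not_contains (h := h)]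

-- A's fused loop = counting fold over the visit sequence
theorem pvA_loop (moves : List Char) (d : PySem.Dict (Int × Int) Int) (pos : Int × Int) :
    (moves.foldl pvAStep (d, pos)).1 =
      (pvWalkFrom pos moves).foldl
        (fun (d : PySem.Dict (Int × Int) Int) p => d.insert p (d.getD p 0 + 1)) d := by
  induction moves generalizing d pos with
  | nil => rfl
  | cons c cs ih =>
      simp only [List.foldl_cons, pvWalkFrom]
      rw [← pvAStep_dict d (pvNextPosition pos c)]
      exact ih _ _

-- B's delta-table step computes A's next position
theorem pvDelta_next (pos : Int × Int) (c : Char) :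
    (pos.1 + (pvDeltas.getD c (0, 0)).1, pos.2 + (pvDeltas.getD c (0, 0)).2) =
      pvNextPosition pos c := by
  have hmk : pvDeltas =
      PySem.Dict.mk [('>', (1, 0)), ('<', (-1, 0)), ('^', (0, 1)), ('v', (0, -1))] := by decide
  by_cases h1 : c = '>'
  · subst h1
    have hg : pvDeltas.getD '>' (0, 0) = ((1 : Int), (0 : Int)) := by decide
    simp [hg, pvNextPosition]
  · by_cases h2 : c = '<'
    · subst h2
      have hg : pvDeltas.getD '<' (0, 0) = ((-1 : Int), (0 : Int)) := by decide
      simp [hg, pvNextPosition, sub_eq_add_neg]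
    · by_cases h3 : c = '^'
      · subst h3
        have hg : pvDeltas.getD '^' (0, 0) = ((0 : Int), (1 : Int)) := by decide
        simp [hg, pvNextPosition]
      · by_cases h4 : c = 'v'
        · subst h4
          have hg : pvDeltas.getD 'v' (0, 0) = ((0 : Int), (-1 : Int)) := by decide
          simp [hg, pvNextPosition, sub_eq_add_neg]
        · have h0 : (PySem.Dict.mk ([] : List (Char × (Int × Int)))).get? c = none := rfl
          rw [hmk]
          simp [PySem.Dict.getD_eq_get?_getD, PySem.Dict.get?_mk_cons, pvNextPosition,
            h1, h2, h3, h4, Ne.symm h1, Ne.symm h2, Ne.symm h3, Ne.symm h4, h0]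

-- B's walk accumulator = the visit sequence
theorem pvWalkNext_acc (moves : List Char) (pos : Int × Int) (acc : List (Int × Int)) :
    (moves.foldl
      (fun (st : (Int × Int) × List (Int × Int)) d =>
        (pvNextPosition st.1 d, st.2 ++ [pvNextPosition st.1 d])) (pos, acc)).2 =
      acc ++ pvWalkFrom pos moves := by
  induction moves generalizing pos acc with
  | nil => simp [pvWalkFrom]
  | cons c cs ih =>
      simp only [List.foldl_cons, pvWalkFrom]
      rw [ih]
      simp

theorem pvWalk_eq (moves : List Char) : pvWalk moves = pvWalkFrom ((0 : Int), (0 : Int)) moves := by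
  have hfun : (fun (st : (Int × Int) × List (Int × Int)) d =>
      let dd := pvDeltas.getD d (0, 0)
      let np := (st.1.1 + dd.1, st.1.2 + dd.2)
      (np, st.2 ++ [np])) =
      (fun (st : (Int × Int) × List (Int × Int)) d =>
        (pvNextPosition st.1 d, st.2 ++ [pvNextPosition st.1 d])) := by
    funext st d
    simp only [pvDelta_next]
  unfold pvWalk
  rw [hfun]
  simpa using pvWalkNext_acc moves ((0 : Int), (0 : Int)) []

-- Python's lexicographic ≤ on int pairs, and sorted2's comparison function
def pvLexLe (a b : Int × Int) : Prop := a.1 < b.1 ∨ (a.1 = b.1 ∧ a.2 ≤ b.2)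

def pvBefore (a b : Int × Int) : Bool :=
  decide (a.1 < b.1) || (!decide (b.1 < a.1) && decide (a.2 < b.2))

theorem pvBefore_false_iff (a b : Int × Int) : pvBefore a b = false ↔ pvLexLe b a := by
  simp [pvBefore, pvLexLe]; omega

theorem pvBefore_true_le (a b : Int × Int) (h : pvBefore a b = true) : pvLexLe a b := by
  simp [pvBefore] at h; simp [pvLexLe]; omega

theorem pvLexLe_trans {a b c : Int × Int} (h1 : pvLexLe a b) (h2 : pvLexLe b c) : pvLexLe a c := by
  simp [pvLexLe] at *; omega

theorem pvLexLe_antisymm {a b : Int × Int} (h1 : pvLexLe a b) (h2 : pvLexLe b a) : a = b := by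
  simp [pvLexLe] at *
  have : a.1 = b.1 ∧ a.2 = b.2 := by omega
  exact Prod.ext this.1 this.2

theorem pvInsertBy_pairwise (x : Int × Int) (l : List (Int × Int)) (h : l.Pairwise pvLexLe) :
    (PySem.List.insertBy pvBefore x l).Pairwise pvLexLe := by
  induction l with
  | nil => simp [PySem.List.insertBy]
  | cons y ys ih =>
      rcases List.pairwise_cons.mp h with ⟨hy, hys⟩
      by_cases hb : pvBefore x y = true
      · have hins : PySem.List.insertBy pvBefore x (y :: ys) = x :: y :: ys := by
          simp [PySem.List.insertBy, hb]
        rw [hins]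
        refine List.pairwise_cons.mpr ⟨?_, h⟩
        intro z hz
        rcases List.mem_cons.mp hz with rfl | hz
        · exact pvBefore_true_le _ _ hb
        · exact pvLexLe_trans (pvBefore_true_le _ _ hb) (hy z hz)
      · have hb' : pvBefore x y = false := by simpa using hb
        have hins : PySem.List.insertBy pvBefore x (y :: ys) =
            y :: PySem.List.insertBy pvBefore x ys := by
          simp [PySem.List.insertBy, hb']
        rw [hins]
        refine List.pairwise_cons.mpr ⟨?_, ih hys⟩
        intro z hz
        rcases (PySem.List.mem_insertBy _ _ _ _).mp hz with rfl | hz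
        · exact (pvBefore_false_iff _ _).mp hb'
        · exact hy z hz

theorem pvFoldl_insertBy_pairwise (xs acc : List (Int × Int)) (h : acc.Pairwise pvLexLe) :
    (xs.foldl (fun acc x => PySem.List.insertBy pvBefore x acc) acc).Pairwise pvLexLe := by
  induction xs generalizing acc with
  | nil => exact h
  | cons x xs ih => exact ih _ (pvInsertBy_pairwise x acc h)

theorem pvSorted2_pairwise (xs : List (Int × Int)) :
    (PySem.List.sorted2 xs Prod.fst Prod.snd).Pairwise pvLexLe := by
  have : PySem.List.sorted2 xs Prod.fst Prod.snd =
      xs.foldl (fun acc x => PySem.List.insertBy pvBefore x acc) [] := rfl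
  rw [this]
  exact pvFoldl_insertBy_pairwise xs [] (by simp)

-- after dropping the leading run of p, p never occurs again in a sorted list
theorem pvNotMem_dropWhile (p : Int × Int) (l : List (Int × Int))
    (hp : ∀ r ∈ l, pvLexLe p r) (h : l.Pairwise pvLexLe) :
    p ∉ l.dropWhile (fun q => q == p) := by
  induction l with
  | nil => simp
  | cons r tl ih =>
      rcases List.pairwise_cons.mp h with ⟨hr, htl⟩
      by_cases hrp : r = p
      · subst hrp
        simp only [List.dropWhile_cons, beq_self_eq_true, if_true]
        exact ih (fun z hz => hp z (List.mem_cons_of_mem _ hz)) htl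
      · have : (r == p) = false := by simpa using hrp
        simp only [List.dropWhile_cons, this, Bool.false_eq_true, if_false]
        intro hmem
        rcases List.mem_cons.mp hmem with rfl | hmem
        · exact hrp rfl
        · exact hrp (pvLexLe_antisymm (hr p hmem) (hp r (List.mem_cons_self)))

theorem pvRunsLoop_getD (l : List (Int × Int)) (d : PySem.Dict (Int × Int) Int)
    (h : l.Pairwise pvLexLe) (p : Int × Int) :
    (pvRunsLoop l d).getD p 0 = if p ∈ l then (l.count p : Int) else d.getD p 0 := by
  induction l, d using pvRunsLoop.induct with
  | case1 d => simp [pvRunsLoop]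
  | case2 p0 rest d ih =>
      rcases List.pairwise_cons.mp h with ⟨hp0, hrest⟩
      have hsplit : rest.takeWhile (fun q => q == p0) ++ rest.dropWhile (fun q => q == p0) = rest :=
        List.takeWhile_append_dropWhile
      have htake : ∀ q ∈ rest.takeWhile (fun q => q == p0), q = p0 := by
        intro q hq
        have := List.mem_takeWhile_imp hq
        simpa using this
      have hdropPairwise : (rest.dropWhile (fun q => q == p0)).Pairwise pvLexLe :=
        List.Pairwise.sublist (List.dropWhile_sublist _) hrest
      have hnd : p0 ∉ rest.dropWhile (fun q => q == p0) := pvNotMem_dropWhile p0 rest hp0 hrest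
      rw [pvRunsLoop]
      rw [ih hdropPairwise]
      by_cases hpp : p = p0
      · subst hpp
        have hcount : (p :: rest).count p =
            (rest.takeWhile (fun q => q == p)).length + 1 := by
          rw [List.count_cons_self]
          have hc2 : rest.count p =
              (rest.takeWhile (fun q => q == p)).count p +
                (rest.dropWhile (fun q => q == p)).count p := by
            conv_lhs => rw [← hsplit]
            rw [List.count_append]
          have h1 : (rest.takeWhile (fun q => q == p)).count p =
              (rest.takeWhile (fun q => q == p)).length := by
            rw [List.count_eq_length]
            intro b hb
            simp [htake b hb]
          have h2 : (rest.dropWhile (fun q => q == p)).count p = 0 :=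
            List.count_eq_zero.mpr hnd
          omega
        simp only [hnd, List.mem_cons_self]
        rw [PySem.Dict.getD_insert_self, hcount]
        push_cast
        ring
      · have hmem : p ∈ rest.dropWhile (fun q => q == p0) ↔ p ∈ p0 :: rest := by
          constructor
          · intro hm
            exact List.mem_cons_of_mem _ ((List.dropWhile_sublist _).mem hm)
          · intro hm
            rcases List.mem_cons.mp hm with rfl | hm
            · exact absurd rfl hpp
            · rw [← hsplit] at hm
              rcases List.mem_append.mp hm with hm | hm
              · exact absurd (htake p hm) hpp
              · exact hm
        have hcnt : (rest.dropWhile (fun q => q == p0)).count p = (p0 :: rest).count p := by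
          have hcc : (p0 :: rest).count p = rest.count p := by
            simp [Ne.symm hpp]
          rw [hcc]
          have hc2 : rest.count p =
              (rest.takeWhile (fun q => q == p0)).count p +
                (rest.dropWhile (fun q => q == p0)).count p := by
            conv_lhs => rw [← hsplit]
            rw [List.count_append]
          have : (rest.takeWhile (fun q => q == p0)).count p = 0 := by
            rw [List.count_eq_zero]
            intro hm
            exact hpp (htake p hm)
          omega
        rw [PySem.Dict.getD_insert_of_ne _ _ _ hpp]
        by_cases hin : p ∈ p0 :: rest
        · rw [if_pos (hmem.mpr hin), if_pos hin, hcnt]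
        · rw [if_neg (fun hm => hin (hmem.mp hm)), if_neg hin]

-- the emit loop: items = first occurrences paired with their counts-table values
theorem pvEmit (c : PySem.Dict (Int × Int) Int) (l : List (Int × Int))
    (s : List (Int × Int)) (d : PySem.Dict (Int × Int) Int)
    (hd : d.items = s.map (fun k => (k, c.getD k 0))) :
    (l.foldl (fun t p => if t.contains p then t else t.insert p (c.getD p 0)) d).items =
      (PySem.Set.update s l).map (fun k => (k, c.getD k 0)) := by
  induction l generalizing s d with
  | nil => simpa [PySem.Set.update] using hd
  | cons p l ih =>
      have hkeys : d.keys = s := by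
        simp [PySem.Dict.keys, hd, Function.comp_def]
      have hcont : d.contains p = decide (p ∈ s) := by
        rw [PySem.Dict.contains_eq_decide_mem_keys, hkeys]
      have hset : PySem.Set.update s (p :: l) = PySem.Set.update (PySem.Set.add s p) l := rfl
      by_cases hmem : p ∈ s
      · have hc : d.contains p = true := by simp [hcont, hmem]
        have hadd : PySem.Set.add s p = s := by
          simp [PySem.Set.add, PySem.Set.contains, List.contains_eq_mem, hmem]
        simp only [List.foldl_cons, hc, if_true, hset, hadd]
        exact ih s d hd
      · have hc : d.contains p = false := by simp [hcont, hmem]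
        have hadd : PySem.Set.add s p = s ++ [p] := by
          simp [PySem.Set.add, PySem.Set.contains, List.contains_eq_mem, hmem]
        simp only [List.foldl_cons, hc, Bool.false_eq_true, if_false, hset, hadd]
        exact ih (s ++ [p]) _ (by rw [PySem.Dict.items_insert_of_not_contains _ _ hc, hd]; simp)

-- ===== VERDICT (by name: the statement is the Claim_ definition above) =====
theorem split_track_presents_spec : Claim_equal_split_track_presents := by
  intro path _
  unfold Spec_split_track_presents split_track_presents split_track_presents_alt
  simp only [pvWalk_eq]
  set m1 := (PySem.List.slice? path.toList (some 0) none 2).getD [] with hm1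
  set m2 := (PySem.List.slice? path.toList (some 1) none 2).getD [] with hm2
  set visits := [(((0 : Int), (0 : Int))), ((0 : Int), (0 : Int))] ++
      pvWalkFrom ((0 : Int), (0 : Int)) m1 ++ pvWalkFrom ((0 : Int), (0 : Int)) m2 with hv
  -- A's dict is the counter of the visit sequence
  have hA : ((m2.foldl pvAStep
      (((m1.foldl pvAStep (PySem.Dict.ofList [((0, 0), 2)], ((0 : Int), (0 : Int)))).1),
        ((0 : Int), (0 : Int)))).1) = PySem.Dict.counter visits := by
    rw [pvA_loop, pvA_loop]
    have hseed : PySem.Dict.ofList [(((0 : Int), (0 : Int)), (2 : Int))] =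
        ([(((0 : Int), (0 : Int))), ((0 : Int), (0 : Int))] : List (Int × Int)).foldl
          (fun (d : PySem.Dict (Int × Int) Int) p => d.insert p (d.getD p 0 + 1))
          PySem.Dict.empty := by decide
    rw [hseed, ← List.foldl_append, ← List.foldl_append, hv,
      PySem.Dict.foldl_insert_getD_add_one_eq_counter, ← List.append_assoc]
  rw [hA, PySem.Dict.items_counter]
  -- B's dict: first occurrences paired with the run-length table's values
  have hB := pvEmit (pvRunsLoop (PySem.List.sorted2 visits Prod.fst Prod.snd) PySem.Dict.empty)
      visits [] PySem.Dict.empty rfl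
  rw [hB]
  have hupd : PySem.Set.update ([] : PySem.Set (Int × Int)) visits = PySem.Set.ofList visits :=
    (PySem.Set.ofList_eq_foldl visits).symm
  rw [hupd]
  -- pointwise: the run-length table agrees with the counter on every visited position
  have hpt : ∀ k ∈ PySem.Set.ofList visits,
      ((k, ((pvRunsLoop (PySem.List.sorted2 visits Prod.fst Prod.snd)
          PySem.Dict.empty).getD k 0)) : (Int × Int) × Int) =
        (k, ((visits.count k : Nat) : Int)) := by
    intro k hk
    have hk' : k ∈ visits := (PySem.Set.mem_ofList visits k).mp hk
    have hperm : (PySem.List.sorted2 visits Prod.fst Prod.snd).Perm visits :=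
      PySem.List.sorted2_perm visits Prod.fst Prod.snd false
    have hks : k ∈ PySem.List.sorted2 visits Prod.fst Prod.snd := hperm.mem_iff.mpr hk'
    rw [pvRunsLoop_getD _ _ (pvSorted2_pairwise visits) k, if_pos hks, hperm.count_eq]
  rw [List.map_congr_left hpt]
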